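-- pv_equiv track=rewrite | github.com/mvdelt/2020testj | learnj/cotePracj/cotePracj copy 47.py | checkIfTreej
-- ===== SOURCE A (Python) =====
-- def checkIfTreej(hubos):
--     flags = [True]*len(hubos)
--     for hubodx, hubo in enumerate(hubos):
--         # 텅빈것도 트리로 친다함.
--         if len(hubo)==0: continue
--
--
--         from collections import defaultdict
--         vmap = defaultdict(list)
--         for u,v in zip(hubo[::2], hubo[1::2]):
--             vmap[v]+=[u]
--
--         # 이제 tree가 맞는지 확인.
--         ## 1. 들어오는 간선이 하나도 없는 단 하나의 노드가 존재한다. 이를 루트(root) 노드라고 부른다.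
--         ### root 1개인지 체크, 1개면 변수바인딩해놓음.
--         if len(vmap)+1 != len(set(hubo)):
--             flags[hubodx] = False; continue
--         root = next(iter(set(hubo)-set(vmap.keys())))
--
--         ## 2. 루트 노드를 제외한 모든 노드는 반드시 단 하나의 들어오는 간선이 존재한다.
--         for (v,uli) in vmap.items():
--             if len(uli)!=1: flags[hubodx]=False; continue
--
--         ## 3. 루트에서 다른 노드로 가는 경로는 반드시 가능.
--         for v in vmap:
--             count=0
--             while v in vmap and count<=len(set(hubo))-1:
--                 count+=1
--                 v = vmap[v][0]
--             if count==len(set(hubo)) or v!=root: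
--                 flags[hubodx] = False; continue
--     return flags
-- ===== SOURCE B (Python) =====
-- def checkIfTreej(hubos):
--     return [_isTreej(hubo) for hubo in hubos]
--
-- def _isTreej(hubo):
--     # One parent pointer per node, built in one pass over the edge pairs;
--     # cycle + reachability by a memoized parent-chain walk: nodes already
--     # known to reach the root ('done') stop a walk immediately, so every
--     # node is walked through at most once overall.
--     if not hubo:
--         return True
--     parent = {}
--     dup = False
--     for i in range(1, len(hubo), 2):
--         v = hubo[i]
--         if v in parent:
--             dup = True
--         parent[v] = hubo[i - 1]
--     if dup or len(parent) + 1 != len(set(hubo)):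
--         return False
--     done = set()
--     for start in parent:
--         v = start
--         onpath = set()
--         while v in parent and v not in done:
--             if v in onpath:
--                 return False  # cycle
--             onpath.add(v)
--             v = parent[v]
--         done |= onpath
--     return True
-- ===== Notes on version B (the rewrite author's own statement) =====
-- stated objective: faster
-- what changed: B builds a single child-to-parent dict in one pass and verifies cycle-freeness/reachability with one memoized parent-chain walk (nodes already proven to reach the root stop later walks), instead of A's per-node chain walk whose while-condition recomputes set(hubo) at every step.
import Mathlib
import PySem

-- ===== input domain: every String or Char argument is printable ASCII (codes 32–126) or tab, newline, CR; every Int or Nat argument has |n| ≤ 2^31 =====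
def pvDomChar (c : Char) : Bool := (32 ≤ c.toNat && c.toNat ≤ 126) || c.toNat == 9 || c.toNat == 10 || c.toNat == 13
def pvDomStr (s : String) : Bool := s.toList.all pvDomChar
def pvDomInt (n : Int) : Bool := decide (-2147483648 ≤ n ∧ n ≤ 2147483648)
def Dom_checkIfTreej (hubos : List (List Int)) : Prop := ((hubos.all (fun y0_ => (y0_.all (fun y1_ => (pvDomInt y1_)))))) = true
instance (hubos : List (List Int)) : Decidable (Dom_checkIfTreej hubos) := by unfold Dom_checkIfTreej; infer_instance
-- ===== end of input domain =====

-- B replaces A's per-node chain walk (which recomputes set(hubo) at every step) by one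
-- parent-pointer dict built in a single pass plus a memoized chain walk; objective: faster.


-- ===== PORT A =====
-- the while loop of check 3: runs while `v in vmap and count <= n-1`; fuel = n - count,
-- so the fuel-0 case is exactly the `count <= n-1` failing
def pvAWalk (vmap : PySem.Dict Int (List Int)) : Nat → Nat → Int → (Nat × Int)
  | 0, count, v => (count, v)
  | fuel+1, count, v =>
    if vmap.contains v then pvAWalk vmap fuel (count+1) ((vmap.getD v []).headD 0)
    else (count, v)

def pvAGraph (hubo : List Int) : Bool :=
  if hubo.length = 0 then true
  else
    let evens := (PySem.List.slice? hubo none none 2).getD []      -- hubo[::2]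
    let odds  := (PySem.List.slice? hubo (some 1) none 2).getD []  -- hubo[1::2]
    let vmap := (evens.zip odds).foldl
      (fun d p => d.insert p.2 (d.getD p.2 [] ++ [p.1])) PySem.Dict.empty
    let shubo := PySem.Set.ofList hubo
    if vmap.size + 1 ≠ shubo.length then false
    else
      -- next(iter(set(hubo)-set(vmap.keys()))): when this line runs the difference is a
      -- singleton (see pvRootUnique below), so taking the first element of the difference
      -- is independent of Python's set iteration order
      let root := (PySem.Set.diff shubo (PySem.Set.ofList vmap.keys)).headD 0
      let flag2 := vmap.items.foldl (fun f p => if p.2.length ≠ 1 then false else f) true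
      let n := shubo.length
      vmap.keys.foldl (fun f v =>
        let r := pvAWalk vmap n 0 v
        if r.1 = n ∨ r.2 ≠ root then false else f) flag2

def checkIfTreej (hubos : List (List Int)) : List Bool := hubos.map pvAGraph

-- ===== PORT B =====
-- one pass over range(1, len(hubo), 2): parent[hubo[i]] = hubo[i-1], dup-flag kept alongside
def pvBBuild (hubo : List Int) : PySem.Dict Int Int × Bool :=
  (PySem.List.pyRange 1 hubo.length 2).foldl
    (fun pd i =>
      (pd.1.insert (PySem.List.pyGetD hubo i 0) (PySem.List.pyGetD hubo (i-1) 0),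
       pd.2 || pd.1.contains (PySem.List.pyGetD hubo i 0)))
    (PySem.Dict.empty, false)

-- the inner while loop; fuel parent.size+1 never runs out (pvBWalkComplete below)
def pvBWalk (parent : PySem.Dict Int Int) (done : PySem.Set Int) :
    Nat → PySem.Set Int → Int → Option (PySem.Set Int)
  | 0, _, _ => none
  | fuel+1, onpath, v =>
    if parent.contains v && !(done.contains v) then
      if onpath.contains v then none  -- cycle: return False
      else pvBWalk parent done fuel (PySem.Set.add onpath v) (parent.getD v 0)
    else some onpath

def pvBLoop (parent : PySem.Dict Int Int) : List Int → PySem.Set Int → Bool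
  | [], _ => true
  | start :: rest, done =>
    match pvBWalk parent done (parent.size + 1) PySem.Set.empty start with
    | none => false
    | some onpath => pvBLoop parent rest (PySem.Set.union done onpath)

def pvBGraph (hubo : List Int) : Bool :=
  if hubo = [] then true
  else
    let pd := pvBBuild hubo
    if pd.2 || (pd.1.size + 1 ≠ (PySem.Set.ofList hubo).length) then false
    else pvBLoop pd.1 pd.1.keys PySem.Set.empty

def checkIfTreej_alt (hubos : List (List Int)) : List Bool := hubos.map pvBGraph

-- ===== PRECONDITION & SPEC =====
def Spec_checkIfTreej (hubos : List (List Int)) (out : List Bool) : Prop := out = checkIfTreej_alt hubos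
instance (hubos : List (List Int)) (out : List Bool) : Decidable (Spec_checkIfTreej hubos out) := by unfold Spec_checkIfTreej; infer_instance

-- ===== CLAIM (what is proved, stated in full; the proofs are below) =====
def Claim_equal_checkIfTreej : Prop := ∀ (hubos : List (List Int)), Dom_checkIfTreej hubos → Spec_checkIfTreej hubos (checkIfTreej hubos)

-- ===== LEMMAS AND PROOFS =====

-- the successive (u, v) edge pairs both programs consume: zip(hubo[::2], hubo[1::2])
def pvPairs : List Int → List (Int × Int)
  | u :: v :: rest => (u, v) :: pvPairs rest
  | _ => []

def pvEveryOther : List Int → List Int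
  | [] => []
  | [a] => [a]
  | a :: _ :: t => a :: pvEveryOther t

-- B's dict build step over one pair
def pvBStep (pd : PySem.Dict Int Int × Bool) (p : Int × Int) : PySem.Dict Int Int × Bool :=
  (pd.1.insert p.2 p.1, pd.2 || pd.1.contains p.2)
def pvPM (ps : List (Int × Int)) (d : PySem.Dict Int Int) : PySem.Dict Int Int :=
  ps.foldl (fun d p => d.insert p.2 p.1) d
def pvVM (ps : List (Int × Int)) (d : PySem.Dict Int (List Int)) : PySem.Dict Int (List Int) :=
  ps.foldl (fun d p => d.insert p.2 (d.getD p.2 [] ++ [p.1])) d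

-- k-fold parent step
def pvIter (pm : PySem.Dict Int Int) : Nat → Int → Int
  | 0, v => v
  | k+1, v => pvIter pm k (pm.getD v 0)

-- the parent chain from v eventually leaves the dict (reaches the root)
def pvEsc (pm : PySem.Dict Int Int) (v : Int) : Prop :=
  ∃ k, pm.contains (pvIter pm k v) = false
lemma pvZipPairs : ∀ (xs : List Int), (pvEveryOther xs).zip (pvEveryOther xs.tail) = pvPairs xs
  | [] => by simp [pvEveryOther, pvPairs]
  | [a] => by simp [pvEveryOther, pvPairs]
  | a :: b :: t => by
    have ih := pvZipPairs t
    cases t with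
    | nil => simp [pvEveryOther, pvPairs]
    | cons c t' =>
      have ih2 := pvZipPairs (c :: t')
      simpa [pvEveryOther, pvPairs] using ih2

lemma pvIterAdd (pm : PySem.Dict Int Int) (a b : Nat) (v : Int) :
    pvIter pm (a+b) v = pvIter pm b (pvIter pm a v) := by
  induction a generalizing v with
  | zero => simp [pvIter]
  | succ a ih =>
    have h : a + 1 + b = (a + b) + 1 := by omega
    rw [h]
    show pvIter pm (a+b) (pm.getD v 0) = _
    rw [ih]
    rfl

lemma pvPairsMem : ∀ (xs : List Int) (p : Int × Int), p ∈ pvPairs xs → p.1 ∈ xs ∧ p.2 ∈ xs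
  | [], p => by simp [pvPairs]
  | [a], p => by simp [pvPairs]
  | a :: b :: t, p => by
    intro hp
    simp only [pvPairs, List.mem_cons] at hp
    rcases hp with h | h
    · subst h; simp
    · have := pvPairsMem t p h
      simp [this.1, this.2]

lemma pvBFoldFst (ps : List (Int × Int)) : ∀ (d : PySem.Dict Int Int) (b : Bool),
    (ps.foldl pvBStep (d, b)).1 = pvPM ps d := by
  induction ps with
  | nil => intro d b; rfl
  | cons p t ih =>
    intro d b
    simp only [List.foldl_cons, pvBStep]
    rw [ih]
    rfl

lemma pvBFoldSnd (ps : List (Int × Int)) : ∀ (d : PySem.Dict Int Int) (b : Bool),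
    (ps.foldl pvBStep (d, b)).2 = false ↔
      (b = false ∧ (ps.map Prod.snd).Nodup ∧ ∀ x ∈ ps.map Prod.snd, d.contains x = false) := by
  induction ps with
  | nil => intro d b; simp
  | cons p t ih =>
    intro d b
    simp only [List.foldl_cons, pvBStep, List.map_cons, List.nodup_cons]
    rw [ih]
    constructor
    · rintro ⟨h1, h2, h3⟩
      have hb : b = false := by cases b <;> simp_all
      have hcont : d.contains p.2 = false := by
        cases hdc : d.contains p.2 <;> simp_all
      refine ⟨hb, ⟨?_, h2⟩, ?_⟩
      · intro hmem
        have := h3 p.2 (by simpa using hmem)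
        rw [PySem.Dict.contains_insert] at this
        simp at this
      · intro x hx
        simp only [List.mem_cons] at hx
        rcases hx with rfl | hx
        · exact hcont
        · have := h3 x hx
          rw [PySem.Dict.contains_insert] at this
          cases hxc : d.contains x
          · rfl
          · simp [hxc] at this
    · rintro ⟨hb, ⟨hnm, h2⟩, h3⟩
      subst hb
      have hcont : d.contains p.2 = false := h3 p.2 (by simp)
      refine ⟨by simp [hcont], h2, ?_⟩
      intro x hx
      rw [PySem.Dict.contains_insert]
      have hxd := h3 x (by simp [hx])
      have hne : x ≠ p.2 := fun he => hnm (he ▸ hx)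
      simp [hxd, hne]

lemma pvVMKeys (ps : List (Int × Int)) (d : PySem.Dict Int (List Int)) :
    (pvVM ps d).keys = PySem.Set.update d.keys (ps.map Prod.snd) :=
  PySem.Dict.keys_foldl_insert_key (key := Prod.snd)
    (f := fun d x => d.getD x.2 [] ++ [x.1]) (l := ps) (d := d)

lemma pvPMKeys (ps : List (Int × Int)) (d : PySem.Dict Int Int) :
    (pvPM ps d).keys = PySem.Set.update d.keys (ps.map Prod.snd) :=
  PySem.Dict.keys_foldl_insert_key (key := Prod.snd)
    (f := fun _ x => x.1) (l := ps) (d := d)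

lemma pvVMGetD (ps : List (Int × Int)) (d : PySem.Dict Int (List Int)) (k : Int) :
    (pvVM ps d).getD k [] = d.getD k [] ++ (ps.filter (fun p => p.2 == k)).map Prod.fst := by
  induction ps using List.reverseRecOn with
  | nil => simp [pvVM]
  | append_singleton t p ih =>
    have hstep : pvVM (t ++ [p]) d = (pvVM t d).insert p.2 ((pvVM t d).getD p.2 [] ++ [p.1]) := by
      simp [pvVM, List.foldl_append]
    rw [hstep, PySem.Dict.getD_insert]
    by_cases hk : k = p.2
    · subst hk
      rw [if_pos rfl, ih]
      simp
    · rw [if_neg hk, ih]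
      have hbf : (p.2 == k) = false := by
        rw [beq_eq_false_iff_ne]; exact fun h => hk h.symm
      simp [List.filter_append, hbf]

lemma pvPMGet (ps : List (Int × Int)) (d : PySem.Dict Int Int) (k : Int) :
    (pvPM ps d).get? k = (((ps.filter (fun p => p.2 == k)).map Prod.fst).getLast?).or (d.get? k) := by
  induction ps using List.reverseRecOn with
  | nil => simp [pvPM]
  | append_singleton t p ih =>
    have hstep : pvPM (t ++ [p]) d = (pvPM t d).insert p.2 p.1 := by
      simp [pvPM, List.foldl_append]
    rw [hstep]
    by_cases hk : k = p.2
    · subst hk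
      rw [PySem.Dict.get?_insert_self]
      simp [List.filter_append]
    · rw [PySem.Dict.get?_insert_of_ne _ _ hk, ih]
      have hbf : (p.2 == k) = false := by
        rw [beq_eq_false_iff_ne]; exact fun h => hk h.symm
      simp [List.filter_append, hbf]

lemma pvFilterMapEO : ∀ (xs : List Int),
    List.filterMap (fun k => xs[2*k]?) (List.range ((xs.length+1)/2)) = pvEveryOther xs
  | [] => by simp [pvEveryOther]
  | [a] => by simp [pvEveryOther, List.range_succ]
  | a :: b :: t => by
    have ih := pvFilterMapEO t
    have hlen : ((a :: b :: t).length + 1)/2 = (t.length+1)/2 + 1 := by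
      simp only [List.length_cons]; omega
    rw [hlen, List.range_succ_eq_map, List.filterMap_cons, List.filterMap_map]
    have hf : (fun x => (a :: b :: t)[2 * x.succ]?) = fun k => t[2*k]? := by
      funext k
      have h2 : 2 * Nat.succ k = (2*k+1) + 1 := by omega
      simp [h2]
    simp only [show (2*0:Nat) = 0 from rfl, List.getElem?_cons_zero, Function.comp_def]
    rw [hf, ih]
    rfl

lemma pvEvenEq (xs : List Int) :
    ((PySem.List.slice? xs none none 2).getD []) = pvEveryOther xs := by
  rw [← pvFilterMapEO xs]
  simp only [PySem.List.slice?, PySem.List.sliceIndices]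
  have hcnt : (if 0 < xs.length then (((xs.length:Int) + 2 - 1) / 2).toNat else 0) = (xs.length + 1) / 2 := by
    split <;> omega
  norm_num
  rw [hcnt]
  apply List.filterMap_congr
  intro k _
  have : (2 * (k:Int)).toNat = 2 * k := by omega
  rw [this]

lemma pvOddEq (xs : List Int) :
    ((PySem.List.slice? xs (some 1) none 2).getD []) = pvEveryOther xs.tail := by
  rw [← pvFilterMapEO xs.tail]
  simp only [PySem.List.slice?, PySem.List.sliceIndices]
  norm_num
  cases xs with
  | nil => simp
  | cons a t =>
    have hmin : min (1:Int) ((a::t).length:Int) = 1 := by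
      simp only [List.length_cons]; omega
    rw [hmin]
    have hcnt : (if 1 < (a::t).length then ((((a::t).length:Int) - 1 + 2 - 1) / 2).toNat else 0)
        = ((a::t).length - 1 + 1) / 2 := by
      simp only [List.length_cons]
      split <;> omega
    rw [hcnt]
    apply List.filterMap_congr
    intro k _
    have h1 : ((1:Int) + 2 * (k:Int)).toNat = (2*k) + 1 := by omega
    rw [h1]

lemma pvRangeFoldPairs : ∀ (xs : List Int) (pd : PySem.Dict Int Int × Bool),
    (List.range (xs.length/2)).foldl
      (fun pd k => pvBStep pd (xs.getD (2*k) 0, xs.getD (2*k+1) 0)) pd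
      = (pvPairs xs).foldl pvBStep pd
  | [], pd => by simp [pvPairs]
  | [a], pd => by simp [pvPairs]
  | a :: b :: t, pd => by
    have ih := pvRangeFoldPairs t (pvBStep pd (a, b))
    have hlen : (a :: b :: t).length / 2 = t.length / 2 + 1 := by
      simp only [List.length_cons]; omega
    rw [hlen, List.range_succ_eq_map, List.foldl_cons, List.foldl_map]
    have hbody : (fun (pd : PySem.Dict Int Int × Bool) (k : Nat) =>
        pvBStep pd ((a :: b :: t).getD (2*(Nat.succ k)) 0, (a :: b :: t).getD (2*(Nat.succ k)+1) 0))
        = fun pd k => pvBStep pd (t.getD (2*k) 0, t.getD (2*k+1) 0) := by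
      funext pd k
      have h2 : 2 * Nat.succ k = (2*k) + 2 := by omega
      simp [h2]
    have hinit : pvBStep pd ((a :: b :: t).getD (2*0) 0, (a :: b :: t).getD (2*0+1) 0) = pvBStep pd (a, b) := by
      simp
    rw [hinit, hbody, ih]
    simp [pvPairs]

lemma pvBBuildEq' (hubo : List Int) :
    (PySem.List.pyRange 1 hubo.length 2).foldl
      (fun pd i =>
        (pd.1.insert (PySem.List.pyGetD hubo i 0) (PySem.List.pyGetD hubo (i-1) 0),
         pd.2 || pd.1.contains (PySem.List.pyGetD hubo i 0)))
      (PySem.Dict.empty, false)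
    = (pvPairs hubo).foldl pvBStep (PySem.Dict.empty, false) := by
  rw [PySem.List.pyRange_of_pos _ _ (by norm_num : (0:Int) < 2), List.foldl_map]
  have hcnt : (if (1:Int) < (hubo.length:Int) then (((hubo.length:Int) - 1 + 2 - 1) / 2).toNat else 0)
      = hubo.length / 2 := by
    split <;> omega
  rw [hcnt, ← pvRangeFoldPairs]
  have hbody : (fun (pd : PySem.Dict Int Int × Bool) (k : Nat) =>
      (pd.1.insert (PySem.List.pyGetD hubo (1 + 2*(k:Int)) 0) (PySem.List.pyGetD hubo (1 + 2*(k:Int) - 1) 0),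
       pd.2 || pd.1.contains (PySem.List.pyGetD hubo (1 + 2*(k:Int)) 0)))
      = fun pd k => pvBStep pd (hubo.getD (2*k) 0, hubo.getD (2*k+1) 0) := by
    funext pd k
    have e1 : (1 + 2*(k:Int)) = ((2*k+1 : Nat):Int) := by push_cast; ring
    have e2 : ((2*k+1 : Nat):Int) - 1 = ((2*k : Nat):Int) := by push_cast; ring
    rw [e1, e2, PySem.List.pyGetD_natCast, PySem.List.pyGetD_natCast]
    rfl
  rw [hbody]
lemma pvIterSuccRight (pm : PySem.Dict Int Int) (k : Nat) (v : Int) :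
    pvIter pm (k+1) v = pm.getD (pvIter pm k v) 0 := by
  induction k generalizing v with
  | zero => rfl
  | succ k ih => exact ih (pm.getD v 0)

lemma pvChainInj (pm : PySem.Dict Int Int) (v : Int) (k : Nat)
    (hk : ∀ j < k, pm.contains (pvIter pm j v) = true)
    (hke : pm.contains (pvIter pm k v) = false)
    {i j : Nat} (hij : i < j) (hjk : j ≤ k)
    (heq : pvIter pm i v = pvIter pm j v) : False := by
  have h1 : pvIter pm (i + (k - j)) v = pvIter pm k v := by
    rw [pvIterAdd, heq, ← pvIterAdd]
    congr 1
    omega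
  have h2 : i + (k - j) < k := by omega
  have := hk _ h2
  rw [h1, hke] at this
  exact Bool.false_ne_true this

lemma pvNodupSubsetLen (l l' : List Int) (h : l.Nodup) (hs : l ⊆ l') : l.length ≤ l'.length := by
  classical
  calc l.length = l.toFinset.card := (List.toFinset_card_of_nodup h).symm
  _ ≤ l'.toFinset.card := Finset.card_le_card (by
      intro x hx; simp only [List.mem_toFinset] at *; exact hs hx)
  _ ≤ l'.length := l'.toFinset_card_le

lemma pvEscLen (pm : PySem.Dict Int Int) (v : Int) (k : Nat)
    (hk : ∀ j < k, pm.contains (pvIter pm j v) = true)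
    (hke : pm.contains (pvIter pm k v) = false) : k ≤ pm.size := by
  have hnd : ((List.range k).map (fun j => pvIter pm j v)).Nodup := by
    refine List.Nodup.map_on ?_ (List.nodup_range)
    intro i hi j hj heq
    simp only [List.mem_range] at hi hj
    by_contra hne
    rcases Nat.lt_or_ge i j with h | h
    · exact pvChainInj pm v k hk hke h (by omega) heq
    · have : j < i := by omega
      exact pvChainInj pm v k hk hke this (by omega) heq.symm
  have hsub : ((List.range k).map (fun j => pvIter pm j v)) ⊆ pm.keys := by
    intro x hx
    rcases List.mem_map.1 hx with ⟨j, hj, rfl⟩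
    simp only [List.mem_range] at hj
    exact ((PySem.Dict.contains_iff_mem_keys pm _)).1 (hk j hj)
  have := pvNodupSubsetLen _ _ hnd hsub
  simp only [List.length_map, List.length_range] at this
  calc k ≤ pm.keys.length := this
  _ = pm.size := by simp [PySem.Dict.keys, PySem.Dict.size]

lemma pvAWalkEsc (vmap : PySem.Dict Int (List Int)) (pm : PySem.Dict Int Int)
    (hc : ∀ x, vmap.contains x = pm.contains x)
    (hh : ∀ x, pm.contains x = true → (vmap.getD x []).headD 0 = pm.getD x 0)
    (mk : Nat) : ∀ (fuel c : Nat) (v : Int), mk ≤ fuel →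
    (∀ j < mk, pm.contains (pvIter pm j v) = true) →
    pm.contains (pvIter pm mk v) = false →
    pvAWalk vmap fuel c v = (c + mk, pvIter pm mk v) := by
  induction mk with
  | zero =>
    intro fuel c v _ _ hke
    cases fuel with
    | zero => simp [pvAWalk, pvIter]
    | succ f =>
      simp only [pvAWalk, hc v]
      rw [show pvIter pm 0 v = v from rfl] at hke
      simp [hke, pvIter]
  | succ mk ih =>
    intro fuel c v hle hk hke
    cases fuel with
    | zero => omega
    | succ f =>
      have hv : pm.contains v = true := hk 0 (by omega)
      simp only [pvAWalk, hc v, hv, if_true]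
      rw [hh v hv]
      have hstep : ∀ j, pvIter pm j (pm.getD v 0) = pvIter pm (j+1) v := by
        intro j; rfl
      rw [ih f (c+1) (pm.getD v 0) (by omega)
        (fun j hj => by rw [hstep]; exact hk (j+1) (by omega))
        (by rw [hstep]; exact hke)]
      rw [hstep, Prod.mk.injEq]
      exact ⟨by omega, rfl⟩

lemma pvAWalkFull (vmap : PySem.Dict Int (List Int)) (pm : PySem.Dict Int Int)
    (hc : ∀ x, vmap.contains x = pm.contains x)
    (hh : ∀ x, pm.contains x = true → (vmap.getD x []).headD 0 = pm.getD x 0)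
    (fuel : Nat) : ∀ (c : Nat) (v : Int),
    (∀ j < fuel, pm.contains (pvIter pm j v) = true) →
    pvAWalk vmap fuel c v = (c + fuel, pvIter pm fuel v) := by
  induction fuel with
  | zero => intro c v _; simp [pvAWalk, pvIter]
  | succ f ih =>
    intro c v hk
    have hv : pm.contains v = true := hk 0 (by omega)
    simp only [pvAWalk, hc v, hv, if_true]
    rw [hh v hv]
    have hstep : ∀ j, pvIter pm j (pm.getD v 0) = pvIter pm (j+1) v := fun j => rfl
    rw [ih (c+1) (pm.getD v 0) (fun j hj => by rw [hstep]; exact hk (j+1) (by omega))]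
    rw [hstep, Prod.mk.injEq]
    exact ⟨by omega, rfl⟩

lemma pvBWalkSound (pm : PySem.Dict Int Int) (done : PySem.Set Int)
    (hdone : ∀ d ∈ done, pvEsc pm d) :
    ∀ (fuel : Nat) (onpath op' : PySem.Set Int) (v : Int),
    pvBWalk pm done fuel onpath v = some op' →
    pvEsc pm v ∧ ∀ x ∈ op', x ∈ onpath ∨ pvEsc pm x := by
  intro fuel
  induction fuel with
  | zero => intro onpath op' v h; simp [pvBWalk] at h
  | succ f ih =>
    intro onpath op' v h
    simp only [pvBWalk] at h
    by_cases hcond : (pm.contains v && !(done.contains v)) = true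
    · rw [if_pos hcond] at h
      by_cases hon : PySem.Set.contains onpath v = true
      · rw [if_pos hon] at h; exact absurd h (by simp)
      · rw [if_neg hon] at h
        obtain ⟨hnext, hmem⟩ := ih (PySem.Set.add onpath v) op' (pm.getD v 0) h
        have hv : pvEsc pm v := by
          obtain ⟨k, hk⟩ := hnext
          exact ⟨k+1, hk⟩
        refine ⟨hv, ?_⟩
        intro x hx
        rcases hmem x hx with hadd | he
        · rcases (PySem.Set.mem_add onpath v x).1 hadd with h' | rfl
          · exact Or.inl h'
          · exact Or.inr hv
        · exact Or.inr he
    · rw [if_neg hcond] at h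
      have hop : op' = onpath := by
        injection h with h'; exact h'.symm
      subst hop
      have hcase : pm.contains v = false ∨ done.contains v = true := by
        cases hc1 : pm.contains v <;> cases hc2 : PySem.Set.contains done v <;> simp_all
      have hesc : pvEsc pm v := by
        rcases hcase with hc1 | hc2
        · exact ⟨0, hc1⟩
        · exact hdone v ((PySem.Set.contains_iff done v).1 hc2)
      exact ⟨hesc, fun x hx => Or.inl hx⟩

lemma pvBWalkComplete (pm : PySem.Dict Int Int) (done : PySem.Set Int) (start : Int) (k : Nat)
    (hk : ∀ j < k, pm.contains (pvIter pm j start) = true)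
    (hke : pm.contains (pvIter pm k start) = false) :
    ∀ (fuel s : Nat), s ≤ k → k - s < fuel →
    pvBWalk pm done fuel ((List.range s).map (fun j => pvIter pm j start)) (pvIter pm s start) ≠ none := by
  intro fuel
  induction fuel with
  | zero => intro s hs hf; omega
  | succ f ih =>
    intro s hs hf
    simp only [pvBWalk]
    by_cases hcond : (pm.contains (pvIter pm s start) && !(done.contains (pvIter pm s start))) = true
    · rw [if_pos hcond]
      have hcont : pm.contains (pvIter pm s start) = true := by
        cases h1 : pm.contains (pvIter pm s start)
        · rw [h1] at hcond; simp at hcond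
        · rfl
      have hsk : s < k := by
        rcases Nat.lt_or_ge s k with h | h
        · exact h
        · have : s = k := by omega
          rw [this, hke] at hcont; exact absurd hcont (by simp)
      have hnotmem : pvIter pm s start ∉ (List.range s).map (fun j => pvIter pm j start) := by
        intro hmem
        rcases List.mem_map.1 hmem with ⟨j, hj, heq⟩
        simp only [List.mem_range] at hj
        exact pvChainInj pm start k hk hke hj (by omega) heq
      have hon : (PySem.Set.contains ((List.range s).map (fun j => pvIter pm j start)) (pvIter pm s start)) = false := by
        cases h1 : PySem.Set.contains ((List.range s).map (fun j => pvIter pm j start)) (pvIter pm s start)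
        · rfl
        · exact absurd ((PySem.Set.contains_iff _ _).1 h1) hnotmem
      rw [if_neg (by rw [hon]; exact Bool.false_ne_true)]
      have hadd : PySem.Set.add ((List.range s).map (fun j => pvIter pm j start)) (pvIter pm s start)
          = (List.range (s+1)).map (fun j => pvIter pm j start) := by
        show (if _ then _ else _) = _
        rw [if_neg (by rw [hon]; exact Bool.false_ne_true), List.range_succ, List.map_append]
        rfl
      have hnext : pm.getD (pvIter pm s start) 0 = pvIter pm (s+1) start :=
        (pvIterSuccRight pm s start).symm
      rw [hadd, hnext]
      exact ih (s+1) (by omega) (by omega)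
    · rw [if_neg hcond]
      simp

lemma pvBLoopTrue (pm : PySem.Dict Int Int) :
    ∀ (starts : List Int) (done : PySem.Set Int),
    (∀ s ∈ starts, pvEsc pm s) → pvBLoop pm starts done = true := by
  intro starts
  induction starts with
  | nil => intro done _; rfl
  | cons start rest ih =>
    intro done hesc
    have hstart := hesc start (by simp)
    classical
    have hkdef := Nat.find_spec hstart
    set k := Nat.find hstart with hkd
    have hkm : ∀ j < k, pm.contains (pvIter pm j start) = true := by
      intro j hj
      have := Nat.find_min hstart hj
      cases h1 : pm.contains (pvIter pm j start)
      · exact absurd h1 this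
      · rfl
    have hle : k ≤ pm.size := pvEscLen pm start k hkm hkdef
    have hwalk := pvBWalkComplete pm done start k hkm hkdef (pm.size + 1) 0 (by omega) (by omega)
    simp only [List.range_zero, List.map_nil] at hwalk
    show (match pvBWalk pm done (pm.size + 1) PySem.Set.empty start with
      | none => false
      | some onpath => pvBLoop pm rest (PySem.Set.union done onpath)) = true
    cases hres : pvBWalk pm done (pm.size + 1) PySem.Set.empty start with
    | none => exact absurd hres hwalk
    | some onpath => exact ih _ (fun s hs => hesc s (by simp [hs]))

lemma pvBLoopEsc (pm : PySem.Dict Int Int) :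
    ∀ (starts : List Int) (done : PySem.Set Int),
    pvBLoop pm starts done = true → (∀ d ∈ done, pvEsc pm d) →
    ∀ s ∈ starts, pvEsc pm s := by
  intro starts
  induction starts with
  | nil => intro done _ _ s hs; simp at hs
  | cons start rest ih =>
    intro done hloop hdone s hs
    revert hloop
    show (match pvBWalk pm done (pm.size + 1) PySem.Set.empty start with
      | none => false
      | some onpath => pvBLoop pm rest (PySem.Set.union done onpath)) = true → _
    cases hres : pvBWalk pm done (pm.size + 1) PySem.Set.empty start with
    | none => intro h; exact absurd h (by simp)
    | some onpath =>
      intro hloop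
      obtain ⟨hesc, hmem⟩ := pvBWalkSound pm done hdone _ _ _ _ hres
      have hdone' : ∀ d ∈ PySem.Set.union done onpath, pvEsc pm d := by
        intro d hd
        rcases (PySem.Set.mem_union done onpath d).1 hd with h | h
        · exact hdone d h
        · rcases hmem d h with h' | h'
          · exact absurd h' (by simp [PySem.Set.empty])
          · exact h'
      rcases List.mem_cons.1 hs with rfl | hrest
      · exact hesc
      · exact ih _ hloop hdone' s hrest

lemma pvRootUnique (S K : List Int) (hS : S.Nodup) (hK : K.Nodup)
    (hsub : ∀ x ∈ K, x ∈ S) (hlen : K.length + 1 = S.length) (x : Int)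
    (hx : x ∈ S) (hxK : x ∉ K) :
    x = (PySem.Set.diff S (PySem.Set.ofList K)).headD 0 := by
  classical
  have hmemK : ∀ y, (PySem.Set.ofList K).contains y = true ↔ y ∈ K := by
    intro y
    show List.contains (PySem.Set.ofList K) y = true ↔ y ∈ K
    rw [List.contains_iff_mem]
    exact PySem.Set.mem_ofList K y
  have hdiff : PySem.Set.diff S (PySem.Set.ofList K)
      = S.filter (fun y => !(PySem.Set.ofList K).contains y) := rfl
  have hmemD : ∀ y, y ∈ PySem.Set.diff S (PySem.Set.ofList K) ↔ (y ∈ S ∧ y ∉ K) := by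
    intro y
    rw [hdiff, List.mem_filter]
    constructor
    · rintro ⟨h1, h2⟩
      refine ⟨h1, fun hy => ?_⟩
      rw [Bool.not_eq_eq_eq_not, Bool.not_true] at h2
      rw [(hmemK y).2 hy] at h2
      exact absurd h2 (by simp)
    · rintro ⟨h1, h2⟩
      refine ⟨h1, ?_⟩
      cases hc : (PySem.Set.ofList K).contains y
      · rfl
      · exact absurd ((hmemK y).1 hc) h2
  -- counting: the filtered kept part has K.length elements, so the diff has exactly one
  have hfk : (S.filter (fun y => (PySem.Set.ofList K).contains y)).length = K.length := by
    apply List.Perm.length_eq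
    apply (List.perm_ext_iff_of_nodup (hS.filter _) hK).2
    intro a
    rw [List.mem_filter]
    constructor
    · rintro ⟨_, h2⟩; exact (hmemK a).1 h2
    · intro ha; exact ⟨hsub a ha, (hmemK a).2 ha⟩
  have hsplit := List.length_eq_length_filter_add
    (l := S) (fun y => (PySem.Set.ofList K).contains y)
  have hlen1 : (PySem.Set.diff S (PySem.Set.ofList K)).length = 1 := by
    rw [hdiff]
    omega
  obtain ⟨a, ha⟩ := List.length_eq_one_iff.1 hlen1
  have hxa : x ∈ PySem.Set.diff S (PySem.Set.ofList K) := (hmemD x).2 ⟨hx, hxK⟩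
  rw [ha] at hxa
  simp only [List.mem_singleton] at hxa
  rw [ha, hxa]
  rfl

lemma pvBBuildEq (hubo : List Int) :
    pvBBuild hubo = (pvPairs hubo).foldl pvBStep (PySem.Dict.empty, false) :=
  pvBBuildEq' hubo

lemma pvSizeKeys {ν : Type} (d : PySem.Dict Int ν) : d.size = d.keys.length := by
  simp [PySem.Dict.size, PySem.Dict.keys]

lemma pvFoldlIf {α : Type} (P : α → Prop) [DecidablePred P] :
    ∀ (l : List α) (b : Bool),
    l.foldl (fun f x => if P x then false else f) b = (b && l.all (fun x => !decide (P x))) := by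
  intro l
  induction l with
  | nil => simp
  | cons x t ih =>
    intro b
    simp only [List.foldl_cons, List.all_cons, ih]
    by_cases h : P x <;> simp [h]

lemma pvContainsEq {ν μ : Type} (d : PySem.Dict Int ν) (e : PySem.Dict Int μ)
    (h : d.keys = e.keys) (x : Int) : d.contains x = e.contains x := by
  cases hd : d.contains x <;> cases he : e.contains x
  · rfl
  · exact absurd (h ▸ (PySem.Dict.contains_iff_mem_keys e x).1 he)
      (fun hm => by rw [(PySem.Dict.contains_iff_mem_keys d x).2 hm] at hd; cases hd)
  · exact absurd (h ▸ (PySem.Dict.contains_iff_mem_keys d x).1 hd)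
      (fun hm => by rw [(PySem.Dict.contains_iff_mem_keys e x).2 hm] at he; cases he)
  · rfl

lemma pvChainMem (pm : PySem.Dict Int Int) (P : Int → Prop)
    (hval : ∀ x u, pm.get? x = some u → P u) :
    ∀ (k : Nat) (v : Int), P v → (∀ j < k, pm.contains (pvIter pm j v) = true) →
    P (pvIter pm k v) := by
  intro k
  induction k with
  | zero => intro v hv _; exact hv
  | succ k ih =>
    intro v hv hk
    rw [pvIterSuccRight]
    have hck : pm.contains (pvIter pm k v) = true := hk k (by omega)
    have hik : P (pvIter pm k v) := ih v hv (fun j hj => hk j (by omega))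
    have hck' := hck
    rw [PySem.Dict.contains_eq_isSome_get?] at hck'
    rcases Option.isSome_iff_exists.1 hck' with ⟨u, hu⟩
    rw [PySem.Dict.getD, hu]
    exact hval _ u hu

lemma pvGraphEq (hubo : List Int) : pvAGraph hubo = pvBGraph hubo := by
  by_cases hnil : hubo = []
  · subst hnil; rfl
  · have hlen0 : ¬ (hubo.length = 0) := by simpa [List.length_eq_zero_iff] using hnil
    unfold pvAGraph pvBGraph
    rw [if_neg hlen0, if_neg hnil]
    simp only [pvEvenEq, pvOddEq, pvZipPairs, pvBBuildEq]
    rw [show (List.foldl (fun d p => d.insert p.2 (d.getD p.2 [] ++ [p.1])) PySem.Dict.empty (pvPairs hubo))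
        = pvVM (pvPairs hubo) PySem.Dict.empty from rfl, pvBFoldFst]
    set ps := pvPairs hubo with hps
    set S := PySem.Set.ofList hubo with hSdef
    set vm := pvVM ps PySem.Dict.empty with hvm
    set pm := pvPM ps PySem.Dict.empty with hpm
    set dup := (List.foldl pvBStep (PySem.Dict.empty, false) ps).2 with hdup
    have hkeysA : vm.keys = PySem.Set.ofList (ps.map Prod.snd) := by
      rw [hvm, pvVMKeys]; rfl
    have hkeysB : pm.keys = PySem.Set.ofList (ps.map Prod.snd) := by
      rw [hpm, pvPMKeys]; rfl
    have hkeys : vm.keys = pm.keys := by rw [hkeysA, hkeysB]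
    have hsz : vm.size = pm.size := by rw [pvSizeKeys, pvSizeKeys, hkeys]
    have hdupIff : dup = false ↔ (ps.map Prod.snd).Nodup := by
      rw [hdup, pvBFoldSnd]
      simp [show ∀ x : Int, (PySem.Dict.empty : PySem.Dict Int Int).contains x = false from fun _ => rfl]
    by_cases hchk : vm.size + 1 ≠ S.length
    · rw [if_pos hchk]
      have hcond : (dup || decide (pm.size + 1 ≠ S.length)) = true := by
        rw [← hsz]
        simp [hchk]
      rw [if_pos hcond]
    · rw [if_neg hchk]
      have hn : pm.size + 1 = S.length := by rw [← hsz]; omega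
      by_cases hnd : (ps.map Prod.snd).Nodup
      · -- no duplicated child: both run the reachability check
        have hdupF : dup = false := hdupIff.2 hnd
        have hcond : (dup || decide (pm.size + 1 ≠ S.length)) = false := by
          rw [hdupF]
          simp [hn]
        rw [if_neg (by rw [hcond]; exact Bool.false_ne_true)]
        rw [pvFoldlIf (fun p : Int × List Int => p.2.length ≠ 1),
          pvFoldlIf (fun v : Int =>
            (pvAWalk vm (S.length) 0 v).1 = S.length ∨
            (pvAWalk vm (S.length) 0 v).2 ≠ (S.diff (PySem.Set.ofList vm.keys)).headD 0)]
        have hcount : ∀ a : Int, ((ps.filter (fun p => p.2 == a)).length) = (ps.map Prod.snd).count a := by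
          intro a
          rw [List.count, List.countP_map, List.countP_eq_length_filter]
          rfl
        have hKnodupA : vm.keys.Nodup := hkeysA ▸ PySem.Set.nodup_ofList _
        have hKnodup : pm.keys.Nodup := hkeysB ▸ PySem.Set.nodup_ofList _
        have hSnodup : S.Nodup := PySem.Set.nodup_ofList hubo
        have hsecmem : ∀ x ∈ ps.map Prod.snd, x ∈ hubo := by
          intro x hx
          rcases List.mem_map.1 hx with ⟨p, hp, rfl⟩
          exact (pvPairsMem hubo p hp).2
        have hkeymemsec : ∀ x, x ∈ pm.keys ↔ x ∈ ps.map Prod.snd := by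
          intro x
          rw [hkeysB]
          exact PySem.Set.mem_ofList _ x
        have hKsub : ∀ x ∈ pm.keys, x ∈ S := by
          intro x hx
          exact (PySem.Set.mem_ofList hubo x).2 (hsecmem x ((hkeymemsec x).1 hx))
        have hgetDvm : ∀ a, vm.getD a [] = (ps.filter (fun p => p.2 == a)).map Prod.fst := by
          intro a
          rw [hvm, pvVMGetD]
          simp [PySem.Dict.getD, PySem.Dict.get?, PySem.Dict.empty]
        have hgetpm : ∀ a, pm.get? a = ((ps.filter (fun p => p.2 == a)).map Prod.fst).getLast? := by
          intro a
          rw [hpm, pvPMGet]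
          simp [PySem.Dict.get?, PySem.Dict.empty]
        have hcount1 : ∀ a ∈ ps.map Prod.snd, (ps.filter (fun p => p.2 == a)).length = 1 := by
          intro a ha
          have h1 := List.nodup_iff_count_le_one.1 hnd a
          have h2 := List.count_pos_iff.2 ha
          rw [hcount a]
          omega
        have hc : ∀ x, vm.contains x = pm.contains x := pvContainsEq vm pm hkeys
        have hh : ∀ x, pm.contains x = true → (vm.getD x []).headD 0 = pm.getD x 0 := by
          intro x hx
          have hxs : x ∈ ps.map Prod.snd :=
            (hkeymemsec x).1 ((PySem.Dict.contains_iff_mem_keys pm x).1 hx)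
          have hl1 : ((ps.filter (fun p => p.2 == x)).map Prod.fst).length = 1 := by
            rw [List.length_map]
            exact hcount1 x hxs
          obtain ⟨u, hu⟩ := List.length_eq_one_iff.1 hl1
          rw [hgetDvm x, PySem.Dict.getD, hgetpm x, hu]
          rfl
        have hval : ∀ x u, pm.get? x = some u → u ∈ hubo := by
          intro x u hxu
          rw [hgetpm x] at hxu
          rcases List.mem_map.1 (List.mem_of_getLast? hxu) with ⟨p, hp, rfl⟩
          exact (pvPairsMem hubo p (List.mem_of_mem_filter hp)).1
        set root := (S.diff (PySem.Set.ofList vm.keys)).headD 0 with hroot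
        have hrootEq : ∀ x, x ∈ S → x ∉ pm.keys → x = root := by
          intro x hx hxK
          rw [hroot, hkeys]
          exact pvRootUnique S pm.keys hSnodup hKnodup hKsub
            (by rw [← pvSizeKeys]; exact hn) x hx hxK
        have hAOk : ∀ v ∈ pm.keys,
            ((pvAWalk vm S.length 0 v).1 = S.length ∨ (pvAWalk vm S.length 0 v).2 ≠ root) ↔
              ¬ pvEsc pm v := by
          intro v hvK
          constructor
          · intro hfail hesc
            classical
            have hkdef := Nat.find_spec hesc
            set k := Nat.find hesc with hkd
            have hkm : ∀ j < k, pm.contains (pvIter pm j v) = true := by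
              intro j hj
              have := Nat.find_min hesc hj
              cases h1 : pm.contains (pvIter pm j v)
              · exact absurd h1 this
              · rfl
            have hkle : k ≤ pm.size := pvEscLen pm v k hkm hkdef
            have hw := pvAWalkEsc vm pm hc hh k S.length 0 v (by omega) hkm hkdef
            rw [hw] at hfail
            rcases hfail with h1 | h2
            · simp only at h1; omega
            · apply h2
              have hvh : v ∈ hubo := hsecmem v ((hkeymemsec v).1 hvK)
              have hin : pvIter pm k v ∈ hubo :=
                pvChainMem pm (· ∈ hubo) (fun x u h => hval x u h) k v hvh hkm
              have hnotK : pvIter pm k v ∉ pm.keys := by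
                intro hmem
                rw [(PySem.Dict.contains_iff_mem_keys pm _).2 hmem] at hkdef
                cases hkdef
              exact hrootEq _ ((PySem.Set.mem_ofList hubo _).2 hin) hnotK
          · intro hnesc
            have hall : ∀ j, pm.contains (pvIter pm j v) = true := by
              intro j
              cases h1 : pm.contains (pvIter pm j v)
              · exact absurd ⟨j, h1⟩ hnesc
              · rfl
            have hw := pvAWalkFull vm pm hc hh S.length 0 v (fun j _ => hall j)
            rw [hw]
            left
            simp
        have hflag2 : (vm.items.all (fun p => !decide (p.2.length ≠ 1))) = true := by
          rw [List.all_eq_true]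
          intro p hp
          have hget : vm.get? p.1 = some p.2 :=
            PySem.Dict.get?_of_mem_items vm (by rw [show (p.1, p.2) = p from rfl]; exact hp) hKnodupA
          have hpk : p.1 ∈ vm.keys := List.mem_map.2 ⟨p, hp, rfl⟩
          have hps1 : p.1 ∈ ps.map Prod.snd := (hkeymemsec p.1).1 (hkeys ▸ hpk)
          have hgd : vm.getD p.1 [] = p.2 := by rw [PySem.Dict.getD, hget]; rfl
          have hlen : p.2.length = 1 := by
            rw [← hgd, hgetDvm p.1, List.length_map]
            exact hcount1 p.1 hps1
          simp [hlen]
        rw [hflag2, hkeys]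
        simp only [Bool.true_and]
        cases hB : pvBLoop pm pm.keys PySem.Set.empty with
        | false =>
          cases hA : pm.keys.all (fun v => !decide
              ((pvAWalk vm S.length 0 v).1 = S.length ∨ (pvAWalk vm S.length 0 v).2 ≠ root)) with
          | false => rfl
          | true =>
            exfalso
            have hesc : ∀ v ∈ pm.keys, pvEsc pm v := by
              intro v hv
              have hvt := List.all_eq_true.1 hA v hv
              by_contra hne
              rw [decide_eq_true ((hAOk v hv).2 hne)] at hvt
              cases hvt
            rw [pvBLoopTrue pm pm.keys PySem.Set.empty hesc] at hB
            cases hB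
        | true =>
          have hesc := pvBLoopEsc pm pm.keys PySem.Set.empty hB
            (by intro d hd; simp [PySem.Set.empty] at hd)
          rw [List.all_eq_true]
          intro v hv
          have hne : ¬ ((pvAWalk vm S.length 0 v).1 = S.length ∨ (pvAWalk vm S.length 0 v).2 ≠ root) :=
            fun hP => (hAOk v hv).1 hP (hesc v hv)
          simp [hne]
      · -- duplicated child: A's per-value length check fails, B's dup flag is set
        have hdupT : dup = true := by
          cases h : dup
          · exact absurd (hdupIff.1 h) hnd
          · rfl
        rw [if_pos (by rw [hdupT]; rfl)]
        rw [pvFoldlIf (fun p : Int × List Int => p.2.length ≠ 1),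
          pvFoldlIf (fun v : Int =>
            (pvAWalk vm (S.length) 0 v).1 = S.length ∨
            (pvAWalk vm (S.length) 0 v).2 ≠ (S.diff (PySem.Set.ofList vm.keys)).headD 0)]
        have hcount : ∀ a : Int, ((ps.filter (fun p => p.2 == a)).length) = (ps.map Prod.snd).count a := by
          intro a
          rw [List.count, List.countP_map, List.countP_eq_length_filter]
          rfl
        have hwit : ∃ a, 2 ≤ (ps.map Prod.snd).count a := by
          by_contra hno
          push Not at hno
          exact hnd (List.nodup_iff_count_le_one.2 (fun a => by have := hno a; omega))
        obtain ⟨a, ha2⟩ := hwit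
        have hamem : a ∈ ps.map Prod.snd := List.count_pos_iff.1 (by omega)
        have hakeys : a ∈ vm.keys := by
          rw [hkeysA]
          exact (PySem.Set.mem_ofList _ a).2 hamem
        obtain ⟨p, hp, hpa⟩ := List.mem_map.1 hakeys
        have hget : vm.get? a = some p.2 := by
          rw [← hpa]
          exact PySem.Dict.get?_of_mem_items vm (by rw [show (p.1, p.2) = p from rfl]; exact hp)
            (hkeysA ▸ PySem.Set.nodup_ofList _)
        have hlen2 : p.2.length ≠ 1 := by
          have hgd : vm.getD a [] = p.2 := by rw [PySem.Dict.getD, hget]; rfl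
          have := pvVMGetD ps PySem.Dict.empty a
          rw [hvm] at hgd
          rw [hgd] at this
          have hlen : p.2.length = (ps.filter (fun p => p.2 == a)).length := by
            rw [this]; simp [PySem.Dict.getD, PySem.Dict.get?, PySem.Dict.empty]
          rw [hlen, hcount a]
          omega
        have hall : (vm.items.all (fun p => !decide (p.2.length ≠ 1))) = false := by
          cases hres : vm.items.all (fun p => !decide (p.2.length ≠ 1))
          · rfl
          · have := List.all_eq_true.1 hres ⟨a, p.2⟩ (by
              have : p = (a, p.2) := by rw [← hpa]
              rw [← this]; exact hp)
            simp [hlen2] at this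
        rw [hall]
        simp

-- ===== VERDICT (by name: the statement is the Claim_ definition above) =====
theorem checkIfTreej_spec : Claim_equal_checkIfTreej := by
  intro hubos _
  show checkIfTreej hubos = checkIfTreej_alt hubos
  unfold checkIfTreej checkIfTreej_alt
  exact List.map_congr_left (fun h _ => pvGraphEq h)
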